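-- pv_equiv track=rewrite | github.com/lizlukasiewicz/daily-coding-problem | November/airbnb_course_hash.py | course_order
-- ===== SOURCE A (Python) =====
-- def course_order(courseIds: dict):
--
--   max_len=max([len(l) for l in courseIds.values()])
--   # loop through courses for required classes
--   for course, req in courseIds.items():
--
--     if len(req)==max_len:
--
--       order_class=[]
--       for c in req:
--         if c in courseIds:
--           order_class.append(c)
--         else:
--           return None
--
--       order_class.append(course)
--       return order_class
--
--   return None
-- ===== SOURCE B (Python) =====
-- def course_order(courseIds: dict):
--     # rank courses by descending prerequisite-list length; stable sort keeps
--     # the first-inserted course among ties in front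
--     course, req = sorted(courseIds.items(), key=lambda kv: -len(kv[1]))[0]
--     if set(req) - courseIds.keys():
--         return None
--     return [*req, course]
-- ===== Notes on version B (the rewrite author's own statement) =====
-- stated objective: simpler
-- what changed: Instead of computing a global max length and rescanning insertion order with an incremental validated-append loop, B stably sorts the items by descending prerequisite count, takes the head, and validates the prerequisites by set difference against the dict's keys.
import Mathlib
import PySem

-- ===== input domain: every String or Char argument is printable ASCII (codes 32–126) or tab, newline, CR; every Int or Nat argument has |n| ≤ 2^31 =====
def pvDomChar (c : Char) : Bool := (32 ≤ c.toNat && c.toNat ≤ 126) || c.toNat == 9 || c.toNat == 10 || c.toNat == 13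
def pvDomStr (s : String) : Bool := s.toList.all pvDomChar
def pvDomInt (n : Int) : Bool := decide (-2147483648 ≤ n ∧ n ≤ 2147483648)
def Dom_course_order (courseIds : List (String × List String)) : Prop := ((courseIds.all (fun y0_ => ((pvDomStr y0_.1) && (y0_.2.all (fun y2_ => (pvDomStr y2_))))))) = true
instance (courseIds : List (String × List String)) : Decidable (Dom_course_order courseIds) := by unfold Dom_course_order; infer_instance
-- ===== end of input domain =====

-- B sorts the items by descending prerequisite count, takes the head, and validates by set
-- difference against the dict keys, instead of A's max-length computation plus insertion-order
-- rescan with a validated append loop (simpler).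

-- ===== PORT A =====
-- inner loop: 'for c in req: if c in courseIds: order_class.append(c) else: return None'
def innerA (courseIds : List (String × List String)) : List String → List String → Option (List String)
  | [], acc => some acc
  | c :: cs, acc =>
    if courseIds.any (fun p => p.1 == c) then innerA courseIds cs (acc ++ [c]) else none

-- outer loop: 'for course, req in courseIds.items(): if len(req)==max_len: …'
def loopA (courseIds : List (String × List String)) (maxLen : Int) : List (String × List String) → Option (List String)
  | [] => none
  | (course, req) :: rest =>
    if (req.length : Int) = maxLen then
      match innerA courseIds req [] with
      | some acc => some (acc ++ [course])
      | none => none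
    else loopA courseIds maxLen rest

def course_order (courseIds : List (String × List String)) : Option (List String) :=
  -- max_len = max([len(l) for l in courseIds.values()]); raises ValueError on empty (excluded by Pre_)
  match PySem.List.max? (courseIds.map (fun p => (p.2.length : Int))) (fun x => x) with
  | none => none
  | some maxLen => loopA courseIds maxLen courseIds

-- ===== PORT B =====
def course_order_alt (courseIds : List (String × List String)) : Option (List String) :=
  -- sorted(courseIds.items(), key=lambda kv: -len(kv[1]))[0]; raises IndexError on empty (excluded by Pre_)
  match PySem.List.sorted courseIds (fun kv => -((kv.2.length : Int))) false with
  | [] => none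
  | (course, req) :: _ =>
    -- 'if set(req) - courseIds.keys(): return None' — emptiness test, order-independent
    if (PySem.Set.diff (PySem.Set.ofList req) (courseIds.map Prod.fst)) = [] then
      some (req ++ [course])
    else none

-- ===== PRECONDITION & SPEC =====
-- Pre_ excludes only the empty dict, on which A's max() raises ValueError (and B's [0] raises IndexError).
def Pre_course_order (courseIds : List (String × List String)) : Prop := courseIds ≠ []
instance (courseIds : List (String × List String)) : Decidable (Pre_course_order courseIds) := by unfold Pre_course_order; infer_instance
def pvWitness_course_order : (List (String × List String)) := [("a", ["b"]), ("b", [])]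

def Spec_course_order (courseIds : List (String × List String)) (out : Option (List String)) : Prop := out = course_order_alt courseIds
instance (courseIds : List (String × List String)) (out : Option (List String)) : Decidable (Spec_course_order courseIds out) := by unfold Spec_course_order; infer_instance

-- ===== CLAIM (what is proved, stated in full; the proofs are below) =====
def Claim_equal_course_order : Prop := ∀ (courseIds : List (String × List String)), Dom_course_order courseIds → Pre_course_order courseIds → Spec_course_order courseIds (course_order courseIds)

-- ===== LEMMAS AND PROOFS =====

-- the foldl inside max?, for an accumulator that is already `some a`
theorem maxFoldl_some {α : Type} (key : α → Int) (t : List α) (a : α) :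
    t.foldl (fun acc x => match acc with
      | none => some x
      | some m => if key m < key x then some x else some m) (some a)
    = some (match PySem.List.max? t key with
      | none => a
      | some m => if key a < key m then m else a) := by
  induction t generalizing a with
  | nil => simp [PySem.List.max?]
  | cons x t ih =>
    simp only [List.foldl_cons]
    have hx : PySem.List.max? (x :: t) key
        = some (match PySem.List.max? t key with
          | none => x
          | some m => if key x < key m then m else x) := by
      simp only [PySem.List.max?, List.foldl_cons]
      exact ih x
    rw [hx]
    by_cases hax : key a < key x
    · rw [if_pos hax, ih x]
      cases h : PySem.List.max? t key with
      | none => simp [hax]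
      | some m => dsimp only; split_ifs <;> first | rfl | omega
    · rw [if_neg hax, ih a]
      cases h : PySem.List.max? t key with
      | none => simp [hax]
      | some m => dsimp only; split_ifs <;> first | rfl | omega

theorem max?_cons {α : Type} (key : α → Int) (x : α) (t : List α) :
    PySem.List.max? (x :: t) key
    = some (match PySem.List.max? t key with
      | none => x
      | some m => if key x < key m then m else x) := by
  simp only [PySem.List.max?, List.foldl_cons]
  exact maxFoldl_some key t x

-- max over the mapped list of keys is the key of the max-by-key element
theorem max?_map_key {α : Type} (key : α → Int) (l : List α) :
    PySem.List.max? (l.map key) (fun x => x) = Option.map key (PySem.List.max? l key) := by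
  induction l with
  | nil => rfl
  | cons x t ih =>
    rw [List.map_cons, max?_cons (fun x : Int => x) (key x) (t.map key), max?_cons key x t]
    cases h : PySem.List.max? t key with
    | none =>
      rw [h] at ih
      simp only [Option.map] at ih ⊢
      rw [ih]
    | some m =>
      rw [h] at ih
      simp only [ih, Option.map]
      by_cases h2 : key x < key m <;> simp [h2]

-- the max-by-key element splits the list: all before it are strictly smaller, all after ≤
theorem max?_split {α : Type} (key : α → Int) (l : List α) (m : α)
    (h : PySem.List.max? l key = some m) :
    ∃ l1 l2, l = l1 ++ m :: l2 ∧ (∀ p ∈ l1, key p < key m) ∧ (∀ p ∈ l2, key p ≤ key m) := by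
  induction l generalizing m with
  | nil => simp [PySem.List.max?] at h
  | cons x t ih =>
    rw [max?_cons] at h
    cases ht : PySem.List.max? t key with
    | none =>
      rw [ht] at h
      have hnil : t = [] := (PySem.List.max?_eq_none_iff _ _).mp ht
      subst hnil
      simp only [Option.some.injEq] at h
      exact ⟨[], [], by simp [h], by simp, by simp⟩
    | some m' =>
      rw [ht] at h
      simp only [Option.some.injEq] at h
      by_cases hx : key x < key m'
      · rw [if_pos hx] at h
        obtain ⟨l1, l2, he, hl1, hl2⟩ := ih m' ht
        refine ⟨x :: l1, l2, ?_, ?_, ?_⟩ <;> rw [← h]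
        · simp [he]
        · intro p hp
          rcases List.mem_cons.mp hp with hp | hp
          · subst hp; exact hx
          · exact hl1 p hp
        · exact hl2
      · rw [if_neg hx] at h
        refine ⟨[], t, by rw [← h]; rfl, by simp, ?_⟩
        intro p hp
        have hle := PySem.List.max?_isMax ht p hp
        rw [← h]; omega

-- loopA skips a prefix of strictly shorter entries and fires at the first entry of maximal length
theorem loopA_split (ids : List (String × List String)) (c : String) (r : List String)
    (l1 l2 : List (String × List String)) (h1 : ∀ p ∈ l1, ((p.2.length : Int)) < (r.length : Int)) :
    loopA ids (r.length : Int) (l1 ++ (c, r) :: l2)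
    = match innerA ids r [] with
      | some acc => some (acc ++ [c])
      | none => none := by
  induction l1 with
  | nil => simp [loopA]
  | cons p t ih =>
    obtain ⟨pc, pr⟩ := p
    have hlt : ((pr.length : Int)) < (r.length : Int) := h1 (pc, pr) (by simp)
    simp only [List.cons_append, loopA]
    rw [if_neg (by omega)]
    exact ih (fun q hq => h1 q (by simp [hq]))

-- the inner append loop is all-or-nothing
theorem innerA_spec (ids : List (String × List String)) (r acc : List String) :
    innerA ids r acc
    = if r.all (fun c => ids.any (fun p => p.1 == c)) then some (acc ++ r) else none := by
  induction r generalizing acc with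
  | nil => simp [innerA]
  | cons c cs ih =>
    simp only [innerA]
    by_cases hc : (ids.any fun p => p.1 == c) = true
    · rw [if_pos hc, ih]
      have hand : ((ids.any fun p => p.1 == c) && cs.all fun c => ids.any fun p => p.1 == c)
          = (cs.all fun c => ids.any fun p => p.1 == c) := by rw [hc]; exact Bool.true_and _
      simp only [List.all_cons, hand]
      split_ifs <;> simp
    · rw [if_neg hc]
      have hcf : (ids.any fun p => p.1 == c) = false := by
        cases h : (ids.any fun p => p.1 == c) with
        | true => exact absurd h hc
        | false => rfl
      have hand : ((ids.any fun p => p.1 == c) && cs.all fun c => ids.any fun p => p.1 == c)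
          = false := by rw [hcf]; rfl
      simp only [List.all_cons, hand]
      simp

-- B-SIDE LEMMAS

-- head of stable insertion: insertBy only looks at the head of a nonempty accumulator
theorem headFold_insertBy {α : Type} (key : α → Int) (l : List α) (h : α) (t : List α) :
    (l.foldl (fun acc x => PySem.List.insertBy (fun a b => decide (key a < key b)) x acc) (h :: t)).head?
    = some (l.foldl (fun m x => if key x < key m then x else m) h) := by
  induction l generalizing h t with
  | nil => rfl
  | cons x l ih =>
    simp only [List.foldl_cons, PySem.List.insertBy]
    by_cases hx : key x < key h
    · simp only [hx, decide_true, if_pos]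
      exact ih x (h :: t)
    · simp only [hx, decide_false, ite_false]
      exact ih h _

-- the foldl inside min?, for an accumulator that is already `some a`
theorem minFoldl_some {α : Type} (key : α → Int) (t : List α) (a : α) :
    t.foldl (fun acc x => match acc with
      | none => some x
      | some m => if key x < key m then some x else some m) (some a)
    = some (t.foldl (fun m x => if key x < key m then x else m) a) := by
  induction t generalizing a with
  | nil => rfl
  | cons x t ih =>
    simp only [List.foldl_cons]
    by_cases hx : key x < key a
    · rw [if_pos hx, if_pos hx]; exact ih x
    · rw [if_neg hx, if_neg hx]; exact ih a

-- head of the ascending stable sort is the FIRST minimal element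
theorem head_sorted_eq_min? {α : Type} (key : α → Int) (l : List α) :
    (PySem.List.sorted l key false).head? = PySem.List.min? l key := by
  cases l with
  | nil => rfl
  | cons x t =>
    rw [PySem.List.sorted_eq_foldl_insertBy]
    simp only [List.foldl_cons, PySem.List.insertBy]
    rw [headFold_insertBy key t x []]
    simp only [PySem.List.min?, List.foldl_cons]
    exact (minFoldl_some key t x).symm

-- first minimum of the negated key is the first maximum of the key
theorem min?_neg_eq_max? {α : Type} (key : α → Int) (l : List α) :
    PySem.List.min? l (fun x => -(key x)) = PySem.List.max? l key := by
  simp only [PySem.List.min?, PySem.List.max?]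
  apply PySem.List.foldl_congr_mem
  intro acc x _
  cases acc with
  | none => rfl
  | some m =>
    simp only
    split_ifs <;> first | rfl | (exfalso; omega)

-- the set-difference emptiness test is the all-membership test
theorem diff_nil_iff_all (ids : List (String × List String)) (r : List String) :
    ((PySem.Set.diff (PySem.Set.ofList r) (ids.map Prod.fst)) = []
      ↔ r.all (fun c => ids.any (fun p => p.1 == c)) = true) := by
  rw [List.eq_nil_iff_forall_not_mem]
  constructor
  · intro h
    rw [List.all_eq_true]
    intro c hc
    by_contra hna
    apply h c
    rw [PySem.Set.mem_diff, PySem.Set.mem_ofList]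
    refine ⟨hc, fun hm => hna ?_⟩
    rw [List.any_eq_true]
    rcases List.mem_map.mp hm with ⟨p, hp, he⟩
    exact ⟨p, hp, by simp [he]⟩
  · intro h y hy
    rw [PySem.Set.mem_diff, PySem.Set.mem_ofList] at hy
    obtain ⟨hyr, hyk⟩ := hy
    have := (List.all_eq_true.mp h) y hyr
    rw [List.any_eq_true] at this
    rcases this with ⟨p, hp, hpe⟩
    exact hyk (List.mem_map.mpr ⟨p, hp, by simpa using hpe⟩)

-- ===== VERDICT (by name: the statement is the Claim_ definition above) =====
theorem course_order_spec : Claim_equal_course_order := by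
  intro courseIds _ hpre
  unfold Spec_course_order course_order course_order_alt
  cases hm : PySem.List.max? courseIds (fun kv => (kv.2.length : Int)) with
  | none => exact absurd ((PySem.List.max?_eq_none_iff _ _).mp hm) hpre
  | some cr =>
    obtain ⟨c, r⟩ := cr
    -- B's sorted head is the first maximal element (c, r)
    have hhead : (PySem.List.sorted courseIds (fun kv => -((kv.2.length : Int))) false).head?
        = some (c, r) := by
      rw [head_sorted_eq_min?, min?_neg_eq_max?]; exact hm
    obtain ⟨l1, l2, he, h1, _⟩ := max?_split (fun kv => ((kv.2.length : Int))) courseIds (c, r) hm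
    have hmap : PySem.List.max? (courseIds.map (fun p => (p.2.length : Int))) (fun x => x)
        = some ((r.length : Int)) := by
      rw [max?_map_key (fun kv => ((kv.2.length : Int))) courseIds, hm]; rfl
    rw [hmap]
    cases hs : PySem.List.sorted courseIds (fun kv => -((kv.2.length : Int))) false with
    | nil => rw [hs] at hhead; exact absurd hhead (by simp)
    | cons hd tl =>
      rw [hs] at hhead
      simp only [List.head?] at hhead
      obtain rfl : hd = (c, r) := by injection hhead
      simp only
      conv_lhs => rw [he]
      rw [loopA_split _ c r l1 l2 (fun p hp => h1 p hp), innerA_spec]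
      by_cases hall : (r.all (fun x => courseIds.any (fun p => p.1 == x))) = true
      · rw [if_pos (by rw [← he]; exact hall),
            if_pos ((diff_nil_iff_all courseIds r).mpr hall)]
        simp
      · rw [if_neg (by rw [← he]; exact hall),
            if_neg (fun hd => hall ((diff_nil_iff_all courseIds r).mp hd))]
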